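-- pv_equiv track=rewrite | github.com/MadPab/Python_tasks | task_5.py | encrypt_text
-- ===== SOURCE A (Python) =====
-- def encrypt_text(text):
--     encrypted = ""
--     for e in text:
--         if 'a' <= e <= 'z':
--             if e == 'z':
--                 encrypted += 'A'
--             else:
--                 encrypted += chr(ord(e.lower()) + 1).upper()
--         elif 'A' <= e <= 'Z':
--             if e == 'Z':
--                 encrypted += 'a'
--             else:
--                 encrypted += chr(ord(e.lower()) + 1).lower()
--         else:
--             encrypted += e
--     return encrypted
--
-- text = "Python is a great choise!"
--
-- encrypted = encrypt_text(text)
-- ===== SOURCE B (Python) =====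
-- _TABLE = str.maketrans(
--     "abcdefghijklmnopqrstuvwxyzABCDEFGHIJKLMNOPQRSTUVWXYZ",
--     "BCDEFGHIJKLMNOPQRSTUVWXYZAbcdefghijklmnopqrstuvwxyza")
--
--
-- def encrypt_text(text):
--     return text.translate(_TABLE)
-- ===== Notes on version B (the rewrite author's own statement) =====
-- stated objective: idiomatic
-- what changed: Replaces A's per-character branching loop with string concatenation by a translation table built once via str.maketrans and a single text.translate pass.
import Mathlib
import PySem

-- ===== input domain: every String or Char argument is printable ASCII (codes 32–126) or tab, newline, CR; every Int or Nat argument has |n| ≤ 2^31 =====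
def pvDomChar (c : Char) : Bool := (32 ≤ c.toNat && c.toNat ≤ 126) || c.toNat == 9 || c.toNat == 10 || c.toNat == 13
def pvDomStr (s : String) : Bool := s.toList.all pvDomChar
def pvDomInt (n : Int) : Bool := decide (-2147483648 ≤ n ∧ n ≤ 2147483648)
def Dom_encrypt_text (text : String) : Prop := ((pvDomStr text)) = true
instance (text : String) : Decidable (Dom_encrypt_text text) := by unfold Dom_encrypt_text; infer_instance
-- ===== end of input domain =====

-- B replaces A's per-character branching loop by a translation table built once and a single lookup pass (idiomatic).

-- ===== PORT A =====
-- chr(ord(…)+1) is ported as Char.ofNat (…toNat + 1): exact here since the argument is an ASCII letter code.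
def encrypt_text (text : String) : String :=
  text.toList.foldl (fun encrypted e =>
    if 'a' ≤ e ∧ e ≤ 'z' then
      if e = 'z' then encrypted ++ "A"
      else encrypted ++ String.ofList [PySem.Chars.upperChar (Char.ofNat ((PySem.Chars.lowerChar e).toNat + 1))]
    else if 'A' ≤ e ∧ e ≤ 'Z' then
      if e = 'Z' then encrypted ++ "a"
      else encrypted ++ String.ofList [PySem.Chars.lowerChar (Char.ofNat ((PySem.Chars.lowerChar e).toNat + 1))]
    else encrypted ++ String.ofList [e]) ""

-- ===== PORT B =====
-- str.maketrans(src, dst): dict mapping each char code of src to the corresponding char of dst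
-- (values modelled as the Char they stand for: exact, every value is one character).
def pvTable : PySem.Dict Nat Char :=
  PySem.Dict.ofList
    (List.zip ("abcdefghijklmnopqrstuvwxyzABCDEFGHIJKLMNOPQRSTUVWXYZ".toList.map Char.toNat)
              "BCDEFGHIJKLMNOPQRSTUVWXYZAbcdefghijklmnopqrstuvwxyza".toList)

-- text.translate(table): each char is replaced by its table entry, unmapped chars kept.
def encrypt_text_alt (text : String) : String :=
  String.ofList (text.toList.map (fun c => (pvTable.get? c.toNat).getD c))

-- ===== PRECONDITION & SPEC =====
def Spec_encrypt_text (text : String) (out : String) : Prop := out = encrypt_text_alt text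
instance (text : String) (out : String) : Decidable (Spec_encrypt_text text out) := by unfold Spec_encrypt_text; infer_instance

-- ===== CLAIM (what is proved, stated in full; the proofs are below) =====
def Claim_equal_encrypt_text : Prop := ∀ (text : String), Dom_encrypt_text text → Spec_encrypt_text text (encrypt_text text)

-- ===== LEMMAS AND PROOFS =====

-- A's loop body with the accumulator factored out (proof-only helper)
def pvStepA (e : Char) : String :=
  if 'a' ≤ e ∧ e ≤ 'z' then
    if e = 'z' then "A"
    else String.ofList [PySem.Chars.upperChar (Char.ofNat ((PySem.Chars.lowerChar e).toNat + 1))]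
  else if 'A' ≤ e ∧ e ≤ 'Z' then
    if e = 'Z' then "a"
    else String.ofList [PySem.Chars.lowerChar (Char.ofNat ((PySem.Chars.lowerChar e).toNat + 1))]
  else String.ofList [e]

-- per-character agreement on every char admitted by the domain (code ≤ 126)
set_option maxRecDepth 8000 in
theorem pv_step_eq (c : Char) (hc : c.toNat ≤ 126) :
    pvStepA c = String.ofList [(pvTable.get? c.toNat).getD c] := by
  have key : ∀ n : Fin 127,
      pvStepA (Char.ofNat n.val) =
        String.ofList [(pvTable.get? (Char.ofNat n.val).toNat).getD (Char.ofNat n.val)] := by decide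
  have := key ⟨c.toNat, Nat.lt_succ_of_le hc⟩
  simpa [Char.ofNat_toNat] using this

theorem pv_fold_eq (l : List Char) (hl : ∀ c ∈ l, c.toNat ≤ 126) (acc : String) :
    l.foldl (fun encrypted e =>
      if 'a' ≤ e ∧ e ≤ 'z' then
        if e = 'z' then encrypted ++ "A"
        else encrypted ++ String.ofList [PySem.Chars.upperChar (Char.ofNat ((PySem.Chars.lowerChar e).toNat + 1))]
      else if 'A' ≤ e ∧ e ≤ 'Z' then
        if e = 'Z' then encrypted ++ "a"
        else encrypted ++ String.ofList [PySem.Chars.lowerChar (Char.ofNat ((PySem.Chars.lowerChar e).toNat + 1))]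
      else encrypted ++ String.ofList [e]) acc
    = acc ++ String.ofList (l.map (fun c => (pvTable.get? c.toNat).getD c)) := by
  induction l generalizing acc with
  | nil => simp
  | cons c l ih =>
    have hc := hl c (List.mem_cons_self ..)
    have hl' : ∀ x ∈ l, x.toNat ≤ 126 := fun x hx => hl x (List.mem_cons_of_mem _ hx)
    have hdist : (if 'a' ≤ c ∧ c ≤ 'z' then
        if c = 'z' then acc ++ "A"
        else acc ++ String.ofList [PySem.Chars.upperChar (Char.ofNat ((PySem.Chars.lowerChar c).toNat + 1))]
      else if 'A' ≤ c ∧ c ≤ 'Z' then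
        if c = 'Z' then acc ++ "a"
        else acc ++ String.ofList [PySem.Chars.lowerChar (Char.ofNat ((PySem.Chars.lowerChar c).toNat + 1))]
      else acc ++ String.ofList [c]) = acc ++ pvStepA c := by
      unfold pvStepA; split_ifs <;> rfl
    simp only [List.foldl_cons, List.map_cons]
    rw [hdist, ih hl', pv_step_eq c hc, String.append_assoc, ← String.ofList_append,
      List.singleton_append]

-- ===== VERDICT (by name: the statement is the Claim_ definition above) =====
theorem encrypt_text_spec : Claim_equal_encrypt_text := by
  intro text hdom
  unfold Spec_encrypt_text encrypt_text encrypt_text_alt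
  have hl : ∀ c ∈ text.toList, c.toNat ≤ 126 := by
    intro c hc
    have := List.all_eq_true.mp hdom c hc
    simp only [pvDomChar, Bool.or_eq_true, Bool.and_eq_true, decide_eq_true_eq, beq_iff_eq] at this
    omega
  rw [pv_fold_eq text.toList hl ""]
  simp
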